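-- pv_equiv track=rewrite | github.com/night-handsomer/django_available | django3_1/app01/utils/sports_analysis.py | skeleton_vector
-- ===== SOURCE A (Python) =====
-- def rev(list):
--     """
--     翻转列表
--     :param list:
--     :return:
--     """
--
--     return [ele for ele in reversed(list)]
--
-- def skeleton_vector(input):
--     """
--     获取骨骼向量
--     :param input:
--     :return:
--     """
--     l = []
--     r = rev(input)
--
--     for i in range(len(r)):
--
--         if not i == len(r)-1:
--             minus = r[i] - r[i+1]
--             l.append(minus)
--
--     minus = rev(l)
--     list = minus[0:2] + minus[-2:]
--     return list
-- ===== SOURCE B (Python) =====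
-- def skeleton_vector(input):
--     # Only the first two and last two consecutive differences are ever returned,
--     # so compute just those boundary differences by index arithmetic: O(1).
--     m = len(input) - 1  # number of consecutive differences
--     idx = list(range(min(2, m))) + list(range(max(m - 2, 0), m))
--     return [input[i + 1] - input[i] for i in idx]
-- ===== Notes on version B (the rewrite author's own statement) =====
-- stated objective: faster
-- what changed: B never builds the difference list at all: since only the first two and last two consecutive differences appear in the result, it computes just those up-to-four boundary differences by index arithmetic (range(min(2,m)) and range(max(m-2,0),m)), O(1) instead of A's reverse/diff-loop/reverse over the whole list.
import Mathlib
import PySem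

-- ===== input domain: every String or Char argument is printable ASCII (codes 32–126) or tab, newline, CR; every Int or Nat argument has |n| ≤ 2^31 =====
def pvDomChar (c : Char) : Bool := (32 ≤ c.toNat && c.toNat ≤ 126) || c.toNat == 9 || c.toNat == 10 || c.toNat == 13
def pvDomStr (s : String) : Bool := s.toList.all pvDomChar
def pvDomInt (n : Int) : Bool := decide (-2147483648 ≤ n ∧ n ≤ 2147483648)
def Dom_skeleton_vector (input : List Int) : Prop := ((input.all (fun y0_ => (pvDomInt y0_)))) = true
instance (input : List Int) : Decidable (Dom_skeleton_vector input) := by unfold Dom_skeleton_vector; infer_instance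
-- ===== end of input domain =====

-- B skips building the difference list entirely: only the up-to-four boundary
-- differences that the result contains are computed, by index arithmetic (objective: faster).

-- ===== PORT A =====
-- rev(list): [ele for ele in reversed(list)]
def rev (list : List Int) : List Int := list.reverse

def skeleton_vector (input : List Int) : List Int :=
  let r := rev input
  let l := (PySem.List.pyRange 0 (r.length : Int) 1).foldl
    (fun acc i =>
      if ¬ i = (r.length : Int) - 1 then
        acc ++ [PySem.List.pyGetD r i 0 - PySem.List.pyGetD r (i + 1) 0]
      else acc) []
  let minus := rev l
  PySem.List.slice minus (some 0) (some 2) ++ PySem.List.slice minus (some (-2)) none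

-- ===== PORT B =====
def skeleton_vector_alt (input : List Int) : List Int :=
  let m : Int := (input.length : Int) - 1
  let idx := PySem.List.pyRange 0 (min 2 m) 1 ++ PySem.List.pyRange (max (m - 2) 0) m 1
  idx.map (fun i => PySem.List.pyGetD input (i + 1) 0 - PySem.List.pyGetD input i 0)

-- ===== PRECONDITION & SPEC =====
def Spec_skeleton_vector (input : List Int) (out : List Int) : Prop := out = skeleton_vector_alt input
instance (input : List Int) (out : List Int) : Decidable (Spec_skeleton_vector input out) := by unfold Spec_skeleton_vector; infer_instance

-- ===== CLAIM (what is proved, stated in full; the proofs are below) =====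
def Claim_equal_skeleton_vector : Prop := ∀ (input : List Int), Dom_skeleton_vector input → Spec_skeleton_vector input (skeleton_vector input)

-- ===== LEMMAS AND PROOFS =====

-- the forward consecutive differences, as a Nat-indexed map
def gdiff (input : List Int) (k : Nat) : Int := input.getD (k + 1) 0 - input.getD k 0
def fdiffs (input : List Int) : List Int := (List.range (input.length - 1)).map (gdiff input)

-- A's index loop over the reversed list produces the adjacent differences r[k] - r[k+1].
theorem loopA_eq (r : List Int) :
    (PySem.List.pyRange 0 (r.length : Int) 1).foldl
      (fun acc i =>
        if ¬ i = (r.length : Int) - 1 then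
          acc ++ [PySem.List.pyGetD r i 0 - PySem.List.pyGetD r (i + 1) 0]
        else acc) []
    = (List.range (r.length - 1)).map (fun k => r.getD k 0 - r.getD (k + 1) 0) := by
  have hconv : (fun (acc : List Int) (i : Int) =>
        if ¬ i = (r.length : Int) - 1 then
          acc ++ [PySem.List.pyGetD r i 0 - PySem.List.pyGetD r (i + 1) 0]
        else acc)
      = (fun (acc : List Int) (i : Int) =>
        if (i != (r.length : Int) - 1) = true then
          acc ++ [PySem.List.pyGetD r i 0 - PySem.List.pyGetD r (i + 1) 0]
        else acc) := by
    funext acc i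
    by_cases h : i = (r.length : Int) - 1 <;> simp [h]
  rw [hconv, PySem.List.foldl_append_if]
  have hfil : (PySem.List.pyRange 0 (r.length : Int) 1).filter
      (fun i => i != (r.length : Int) - 1) = PySem.List.pyRange 0 ((r.length : Int) - 1) 1 := by
    rcases Nat.eq_zero_or_pos r.length with h0 | hpos
    · simp [h0, PySem.List.pyRange_one_eq_nil]
    · rw [PySem.List.pyRange_one_append 0 ((r.length : Int) - 1) (r.length : Int)
        (by omega) (by omega), List.filter_append]
      have h1 : PySem.List.pyRange ((r.length : Int) - 1) (r.length : Int) 1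
          = [(r.length : Int) - 1] := by
        set m : Int := (r.length : Int) - 1 with hm
        rw [show (r.length : Int) = m + 1 by omega, PySem.List.pyRange_one_singleton]
      rw [h1]
      have h2 : (PySem.List.pyRange 0 ((r.length : Int) - 1) 1).filter
          (fun i => i != (r.length : Int) - 1)
          = PySem.List.pyRange 0 ((r.length : Int) - 1) 1 := by
        apply List.filter_eq_self.mpr
        intro i hi
        have := PySem.List.mem_pyRange_one.mp hi
        simp only [bne_iff_ne, ne_eq]
        omega
      rw [h2]
      simp
  rw [hfil, PySem.List.pyRange_one, List.map_map]
  have hn : (((r.length : Int) - 1) - 0).toNat = r.length - 1 := by omega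
  rw [hn]
  apply List.map_congr_left
  intro k hk
  simp only [Function.comp]
  have e1 : (0 : Int) + (k : Int) = ((k : Nat) : Int) := by omega
  have e2 : ((k : Nat) : Int) + 1 = ((k + 1 : Nat) : Int) := by omega
  simp only [e1, e2, PySem.List.pyGetD_natCast, List.getD]

-- reversing A's differences of the reversed input gives the forward differences
theorem rev_diffs_eq (input : List Int) :
    ((List.range ((rev input).length - 1)).map
        (fun k => (rev input).getD k 0 - (rev input).getD (k + 1) 0)).reverse
      = fdiffs input := by
  apply List.ext_getElem
  · simp [rev, fdiffs]
  · intro i h1 h2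
    simp only [rev, fdiffs, List.length_reverse, List.length_map, List.length_range] at h1 h2
    have hi : i < input.length - 1 := by omega
    rw [List.getElem_reverse]
    simp only [rev, fdiffs, gdiff, List.length_reverse, List.length_map, List.length_range,
      List.getElem_map, List.getElem_range]
    rw [List.getD_eq_getElem _ _ (by simp; omega), List.getD_eq_getElem _ _ (by simp; omega),
        List.getD_eq_getElem _ _ (by omega), List.getD_eq_getElem _ _ (by omega)]
    rw [List.getElem_reverse, List.getElem_reverse]
    congr 1 <;> congr 1 <;> omega

-- B's front range yields the first two forward differences
theorem front_eq (input : List Int) :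
    (PySem.List.pyRange 0 (min 2 ((input.length : Int) - 1)) 1).map
      (fun i => PySem.List.pyGetD input (i + 1) 0 - PySem.List.pyGetD input i 0)
    = (fdiffs input).take 2 := by
  apply List.ext_getElem
  · simp only [List.length_map, PySem.List.length_pyRange_one, List.length_take, fdiffs,
      List.length_range]
    omega
  · intro i h1 h2
    simp only [List.length_map, PySem.List.length_pyRange_one] at h1
    rw [List.getElem_map, PySem.List.getElem_pyRange_one]
    rw [List.getElem_take]; simp only [fdiffs, List.getElem_map, List.getElem_range]
    have e1 : (0 : Int) + (i : Int) = ((i : Nat) : Int) := by omega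
    have e2 : ((i : Nat) : Int) + 1 = ((i + 1 : Nat) : Int) := by omega
    simp only [e1, e2, PySem.List.pyGetD_natCast, gdiff, List.getD]

-- B's back range yields the last two forward differences
theorem back_eq (input : List Int) :
    (PySem.List.pyRange (max ((input.length : Int) - 1 - 2) 0) ((input.length : Int) - 1) 1).map
      (fun i => PySem.List.pyGetD input (i + 1) 0 - PySem.List.pyGetD input i 0)
    = (fdiffs input).drop ((input.length - 1) - 2) := by
  apply List.ext_getElem
  · simp only [List.length_map, PySem.List.length_pyRange_one, List.length_drop, fdiffs,
      List.length_range]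
    omega
  · intro i h1 h2
    simp only [List.length_map, PySem.List.length_pyRange_one] at h1
    rw [List.getElem_map, PySem.List.getElem_pyRange_one]
    rw [List.getElem_drop]; simp only [fdiffs, List.getElem_map, List.getElem_range]
    have e1 : max ((input.length : Int) - 1 - 2) 0 + (i : Int)
        = (((input.length - 1 - 2 + i : Nat)) : Int) := by
      have : (input.length - 1 - 2 + i : Nat) = ((input.length : Int) - 1 - 2 + i) ∨
          ((input.length : Int) - 1 - 2 ≤ 0 ∧ (input.length - 1 - 2 + i : Nat) = i) := by omega
      omega
    have e2 : (((input.length - 1 - 2 + i : Nat)) : Int) + 1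
        = (((input.length - 1 - 2 + i + 1 : Nat)) : Int) := by omega
    simp only [e1, e2, PySem.List.pyGetD_natCast, gdiff, List.getD]

-- ===== VERDICT (by name: the statement is the Claim_ definition above) =====
theorem skeleton_vector_spec : Claim_equal_skeleton_vector := by
  intro input _
  show skeleton_vector input = skeleton_vector_alt input
  unfold skeleton_vector skeleton_vector_alt
  simp only []
  rw [loopA_eq]
  rw [show rev ((List.range ((rev input).length - 1)).map
        (fun k => (rev input).getD k 0 - (rev input).getD (k + 1) 0))
      = ((List.range ((rev input).length - 1)).map
        (fun k => (rev input).getD k 0 - (rev input).getD (k + 1) 0)).reverse from rfl]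
  rw [rev_diffs_eq, List.map_append, front_eq, back_eq]
  rw [PySem.List.slice_zero_start, PySem.List.slice_to _ (by omega : (0:Int) ≤ 2),
      PySem.List.slice_from_neg_ofNat (fdiffs input) 2 (by omega)]
  simp [fdiffs]
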